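-- pv_equiv track=rewrite | github.com/jackliuto/model_diff_XADD | modeldiff/visualization/plot_function.py | value_p1
-- ===== SOURCE A (Python) =====
-- def value_p1(x,y,gx,gy,cx,cy,t=20):
--
--     if x > gx or y > gy:
--         return None
--
--     total_r = 0
--
--     x_list = [(i, y) for i in range(x, gx+1)]
--     y_list = [(gx, i) for i in range(y+1, gy+1)]
--
--
--     total_list = list(set(x_list + y_list))
--
--     do_nothing_times = t - len(total_list)
--
--     for i in total_list:
--         total_r += -(abs(cx - i[0]) + abs(cy - i[1]))
--
--     total_r += do_nothing_times * -(abs(cx - gx) + abs(cy - gy))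
--     return total_r
-- ===== SOURCE B (Python) =====
-- def value_p1(x, y, gx, gy, cx, cy, t=20):
--     # Closed-form O(1): arithmetic sums of |c - i| over the two contiguous ranges.
--     if x > gx or y > gy:
--         return None
--
--     def tri(n):
--         return n * (n + 1) // 2 if n > 0 else 0
--
--     def absrange(a, b, c):
--         # sum of |c - i| for integer i in [a, b]; 0 if a > b
--         return tri(b - c) - tri(a - 1 - c) + tri(c - a) - tri(c - b - 1)
--
--     nx = gx - x + 1
--     ny = gy - y
--     sx = absrange(x, gx, cx) + nx * abs(cy - y)
--     sy = ny * abs(cx - gx) + absrange(y + 1, gy, cy)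
--     return -(sx + sy) - (t - nx - ny) * (abs(cx - gx) + abs(cy - gy))
-- ===== Notes on version B (the rewrite author's own statement) =====
-- stated objective: faster
-- what changed: Replaced A's enumeration of every cell of the L-shaped path (two list comprehensions, set dedup, and a summing loop) by closed-form triangular-number sums of |c - i| over the two contiguous integer ranges.
import Mathlib
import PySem

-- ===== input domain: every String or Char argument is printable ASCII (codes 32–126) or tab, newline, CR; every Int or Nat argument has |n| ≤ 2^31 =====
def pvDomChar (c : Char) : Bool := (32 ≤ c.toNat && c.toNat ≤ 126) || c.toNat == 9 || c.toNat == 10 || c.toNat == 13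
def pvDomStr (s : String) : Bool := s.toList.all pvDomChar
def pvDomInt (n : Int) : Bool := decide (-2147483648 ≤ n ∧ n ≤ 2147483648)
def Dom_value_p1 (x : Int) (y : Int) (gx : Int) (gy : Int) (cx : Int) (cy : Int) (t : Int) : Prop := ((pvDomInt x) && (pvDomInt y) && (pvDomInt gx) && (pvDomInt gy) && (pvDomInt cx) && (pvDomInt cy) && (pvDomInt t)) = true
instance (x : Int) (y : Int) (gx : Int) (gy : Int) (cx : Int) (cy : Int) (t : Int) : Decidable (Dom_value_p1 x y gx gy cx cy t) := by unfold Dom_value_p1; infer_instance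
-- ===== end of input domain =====

-- B replaces A's O(gx-x + gy-y) enumeration of the L-shaped path by closed-form
-- arithmetic sums of |c - i| over the two contiguous integer ranges (O(1)).

-- ===== PORT A =====
def value_p1 (x : Int) (y : Int) (gx : Int) (gy : Int) (cx : Int) (cy : Int) (t : Int) : Option Int :=
  if x > gx ∨ y > gy then none
  else
    let total_r : Int := 0
    let x_list : List (Int × Int) := (PySem.List.pyRange x (gx + 1) 1).map (fun i => (i, y))
    let y_list : List (Int × Int) := (PySem.List.pyRange (y + 1) (gy + 1) 1).map (fun i => (gx, i))
    let total_list : PySem.Set (Int × Int) := PySem.Set.ofList (x_list ++ y_list)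
    let do_nothing_times : Int := t - (total_list.length : Int)
    let total_r := total_list.foldl (fun acc i => acc + -(|cx - i.1| + |cy - i.2|)) total_r
    let total_r := total_r + do_nothing_times * -(|cx - gx| + |cy - gy|)
    some total_r

-- ===== PORT B =====
def pvTri (n : Int) : Int := if n > 0 then PySem.Int.floordiv (n * (n + 1)) 2 else 0

-- sum of |c - i| for integer i in [a, b]; 0 if a > b
def pvAbsrange (a : Int) (b : Int) (c : Int) : Int :=
  pvTri (b - c) - pvTri (a - 1 - c) + pvTri (c - a) - pvTri (c - b - 1)

def value_p1_alt (x : Int) (y : Int) (gx : Int) (gy : Int) (cx : Int) (cy : Int) (t : Int) : Option Int :=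
  if x > gx ∨ y > gy then none
  else
    let nx := gx - x + 1
    let ny := gy - y
    let sx := pvAbsrange x gx cx + nx * |cy - y|
    let sy := ny * |cx - gx| + pvAbsrange (y + 1) gy cy
    some (-(sx + sy) - (t - nx - ny) * (|cx - gx| + |cy - gy|))

-- ===== PRECONDITION & SPEC =====
def Spec_value_p1 (x : Int) (y : Int) (gx : Int) (gy : Int) (cx : Int) (cy : Int) (t : Int) (out : Option Int) : Prop := out = value_p1_alt x y gx gy cx cy t
instance (x : Int) (y : Int) (gx : Int) (gy : Int) (cx : Int) (cy : Int) (t : Int) (out : Option Int) : Decidable (Spec_value_p1 x y gx gy cx cy t out) := by unfold Spec_value_p1; infer_instance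

-- ===== CLAIM (what is proved, stated in full; the proofs are below) =====
def Claim_equal_value_p1 : Prop := ∀ (x : Int) (y : Int) (gx : Int) (gy : Int) (cx : Int) (cy : Int) (t : Int), Dom_value_p1 x y gx gy cx cy t → Spec_value_p1 x y gx gy cx cy t (value_p1 x y gx gy cx cy t)

-- ===== LEMMAS AND PROOFS =====

theorem pvTri_nonpos {n : Int} (h : n ≤ 0) : pvTri n = 0 := by
  unfold pvTri; rw [if_neg (by omega)]

theorem pvTri_pos {m : Int} (hm : 0 < m) : pvTri m = pvTri (m - 1) + m := by
  unfold pvTri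
  rw [if_pos hm, PySem.Int.floordiv_eq_ediv_of_pos (by norm_num)]
  by_cases h1 : m - 1 > 0
  · rw [if_pos h1, PySem.Int.floordiv_eq_ediv_of_pos (by norm_num)]
    have e : m * (m + 1) = (m - 1) * (m - 1 + 1) + 2 * m := by ring
    have hd : (2:Int) ∣ (m - 1) * (m - 1 + 1) := (Int.even_mul_succ_self (m - 1)).two_dvd
    omega
  · rw [if_neg h1]
    have hm1 : m = 1 := by omega
    subst hm1; decide

theorem pvTri_step (m : Int) : pvTri m - pvTri (m - 1) + pvTri (-m) - pvTri (-m - 1) = |m| := by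
  rcases lt_trichotomy m 0 with hm | hm | hm
  · rw [abs_of_neg hm, pvTri_nonpos (by omega : m ≤ 0), pvTri_nonpos (by omega : m - 1 ≤ 0),
      pvTri_pos (by omega : (0:Int) < -m)]
    have e : -m - 1 = -m - 1 := rfl
    omega
  · subst hm; decide
  · rw [abs_of_pos hm, pvTri_nonpos (by omega : -m ≤ 0), pvTri_nonpos (by omega : -m - 1 ≤ 0),
      pvTri_pos hm]
    omega

theorem fold_core (c d : Int) : ∀ (n : Nat) (a s : Int),
    (PySem.List.pyRange a (a + n) 1).foldl (fun acc i => acc - |c - i| - d) s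
      = s - (pvTri (a + n - 1 - c) - pvTri (a - 1 - c) + pvTri (c - a) - pvTri (c - (a + n))) - n * d := by
  intro n
  induction n with
  | zero =>
    intro a s
    rw [PySem.List.pyRange_one_eq_nil (by push_cast; omega)]
    have e : a + ((0:Nat):Int) = a := by push_cast; ring
    rw [e]
    simp only [List.foldl_nil, Nat.cast_zero]
    ring
  | succ k ih =>
    intro a s
    have hsplit : PySem.List.pyRange a (a + (k + 1 : Nat)) 1
        = PySem.List.pyRange a (a + k) 1 ++ [a + k] := by
      have h : (a + (k + 1 : Nat) : Int) = (a + k) + 1 := by push_cast; ring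
      rw [h, PySem.List.pyRange_one_succ_right (by push_cast; omega)]
    rw [hsplit, List.foldl_append, ih]
    simp only [List.foldl_cons, List.foldl_nil]
    push_cast
    have e3 : c - (a + ((k:Int) + 1)) = -(a + (k:Int) - c) - 1 := by ring
    have e4 : a + ((k:Int) + 1) - 1 - c = a + (k:Int) - c := by ring
    rw [e3, e4]
    have e1 : a + (k:Int) - 1 - c = (a + (k:Int) - c) - 1 := by ring
    have e2 : c - (a + (k:Int)) = -(a + (k:Int) - c) := by ring
    rw [e1, e2]
    have hstep := pvTri_step (a + (k:Int) - c)
    have habs : |(-(a + (k:Int) - c))| = |a + (k:Int) - c| := abs_neg _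
    linarith

theorem nodup_path (x y gx gy : Int) :
    ((PySem.List.pyRange x (gx + 1) 1).map (fun i => (i, y)) ++
      (PySem.List.pyRange (y + 1) (gy + 1) 1).map (fun i => ((gx : Int), i))).Nodup := by
  apply List.Nodup.append
  · exact List.Nodup.map (fun a b h => by injection h) (PySem.List.nodup_pyRange_one _ _)
  · exact List.Nodup.map (fun a b h => by injection h) (PySem.List.nodup_pyRange_one _ _)
  · intro p hp hq
    simp only [List.mem_map] at hp hq
    obtain ⟨i, hi, rfl⟩ := hp
    obtain ⟨j, hj, hEq⟩ := hq
    rw [PySem.List.mem_pyRange_one] at hi hj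
    have hsnd : j = y := by
      have := congrArg Prod.snd hEq
      simpa using this
    omega

theorem value_p1_eq (x y gx gy cx cy t : Int) :
    value_p1 x y gx gy cx cy t = value_p1_alt x y gx gy cx cy t := by
  unfold value_p1 value_p1_alt
  by_cases hg : x > gx ∨ y > gy
  · rw [if_pos hg, if_pos hg]
  · rw [if_neg hg, if_neg hg]
    push_neg at hg
    obtain ⟨hx, hy⟩ := hg
    dsimp only
    set xl := (PySem.List.pyRange x (gx + 1) 1).map (fun i => (i, y)) with hxl
    set yl := (PySem.List.pyRange (y + 1) (gy + 1) 1).map (fun i => ((gx : Int), i)) with hyl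
    have hnd : (xl ++ yl).Nodup := nodup_path x y gx gy
    rw [PySem.Set.ofList_eq_self_of_nodup _ hnd]
    have hlx : xl.length = (gx + 1 - x).toNat := by
      rw [hxl, List.length_map, PySem.List.length_pyRange_one]
    have hly : yl.length = (gy + 1 - (y + 1)).toNat := by
      rw [hyl, List.length_map, PySem.List.length_pyRange_one]
    have hfun : ∀ (l : List (Int × Int)) (s : Int),
        l.foldl (fun acc i => acc + -(|cx - i.1| + |cy - i.2|)) s
          = l.foldl (fun acc i => acc - |cx - i.1| - |cy - i.2|) s := by
      intro l s
      apply PySem.List.foldl_congr_mem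
      intro acc i _; ring
    rw [List.foldl_append, hfun, hfun]
    rw [hxl, hyl, List.foldl_map, List.foldl_map]
    have hnx : (gx + 1 : Int) = x + ((gx + 1 - x).toNat : Int) := by omega
    have hny : (gy + 1 : Int) = (y + 1) + ((gy - y).toNat : Int) := by omega
    have hfx := fold_core cx (|cy - y|) (gx + 1 - x).toNat x 0
    rw [← hnx] at hfx
    have hfy' : ∀ s : Int,
        (PySem.List.pyRange (y + 1) (gy + 1) 1).foldl (fun acc i => acc - |cy - i| - |cx - gx|) s
          = s - (pvTri (gy - cy) - pvTri (y - cy) + pvTri (cy - (y + 1)) - pvTri (cy - (gy + 1))) - ((gy - y).toNat : Int) * |cx - gx| := by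
      intro s
      have h := fold_core cy (|cx - gx|) (gy - y).toNat (y + 1) s
      rw [← hny] at h
      have e : gy + 1 - 1 - cy = gy - cy := by ring
      have e2 : (y + 1 - 1 - cy) = y - cy := by ring
      rw [e, e2] at h
      exact h
    have hcomm : ∀ s : Int,
        (PySem.List.pyRange (y + 1) (gy + 1) 1).foldl (fun acc i => acc - |cx - gx| - |cy - i|) s
          = (PySem.List.pyRange (y + 1) (gy + 1) 1).foldl (fun acc i => acc - |cy - i| - |cx - gx|) s := by
      intro s
      apply PySem.List.foldl_congr_mem
      intro acc i _; ring
    rw [hcomm, hfy', hfx]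
    have c1 : ((gx + 1 - x).toNat : Int) = gx + 1 - x := by omega
    have c2 : ((gy + 1 - (y + 1)).toNat : Int) = gy - y := by omega
    have c3 : ((gy - y).toNat : Int) = gy - y := by omega
    rw [List.length_append, hlx, hly, Nat.cast_add, c1, c2, c3]
    unfold pvAbsrange
    have e1 : gx + 1 - 1 - cx = gx - cx := by ring
    have e2 : cx - (gx + 1) = cx - gx - 1 := by ring
    have e5 : cy - (gy + 1) = cy - gy - 1 := by ring
    rw [e1, e2, e5]
    ring

-- ===== VERDICT (by name: the statement is the Claim_ definition above) =====
theorem value_p1_spec : Claim_equal_value_p1 := by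
  intro x y gx gy cx cy t _
  unfold Spec_value_p1
  exact value_p1_eq x y gx gy cx cy t
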